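-- pv_equiv track=rewrite | github.com/quantumlib/OpenFermion | src/openfermion/utils/bch_expansion.py | _split_by_descending_edge
-- ===== SOURCE A (Python) =====
-- def _split_by_descending_edge(bin_str):
--     """
--     Split binary string representation by descending edges,
--     i.e. '0101' -> '01 | 01'
--     e.g. '01001101' -> ['01', '0011', '01']
--     """
--     prev = '0'
--     split_idx = [0]
--
--     # generate a list of indices where split needs to happen
--     for idx, i in enumerate(bin_str):
--         if prev == '1' and i == '0':
--             split_idx.append(idx)
--         prev = i
--
--     # split by taking substrings between each two split indices
--     if len(split_idx) == 1:
--         return [bin_str]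
--     else:
--         return [bin_str[i:j] for i, j in zip(split_idx, split_idx[1:] + [None])]
-- ===== SOURCE B (Python) =====
-- def _split_by_descending_edge(bin_str):
--     """Single pass: build chunks directly with an accumulator instead of
--     collecting split indices and slicing between them."""
--     result = []
--     cur = ''
--     prev = '0'
--     for ch in bin_str:
--         if prev == '1' and ch == '0':
--             result.append(cur)
--             cur = ''
--         cur += ch
--         prev = ch
--     result.append(cur)
--     return result
-- ===== Notes on version B (the rewrite author's own statement) =====
-- stated objective: simpler
-- what changed: Single forward pass building the chunks directly with a result/current-chunk accumulator, instead of first collecting split indices and then slicing the string between consecutive indices.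
import Mathlib
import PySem

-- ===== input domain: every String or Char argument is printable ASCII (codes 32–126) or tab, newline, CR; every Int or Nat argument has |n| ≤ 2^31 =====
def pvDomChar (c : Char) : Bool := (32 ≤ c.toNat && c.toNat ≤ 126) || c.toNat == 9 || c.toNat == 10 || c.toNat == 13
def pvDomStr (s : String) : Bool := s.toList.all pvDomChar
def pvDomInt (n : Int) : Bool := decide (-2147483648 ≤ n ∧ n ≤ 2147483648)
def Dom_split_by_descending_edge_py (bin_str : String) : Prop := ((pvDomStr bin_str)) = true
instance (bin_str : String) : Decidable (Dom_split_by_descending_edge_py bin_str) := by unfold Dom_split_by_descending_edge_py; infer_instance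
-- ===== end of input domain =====

-- B replaces A's collect-split-indices-then-slice scheme by a single pass that builds
-- the chunks directly with a result/current-chunk accumulator (objective: simpler).

-- ===== PORT A =====
-- literal port of _split_by_descending_edge: foldl over enumerate collects split
-- indices, then either the whole string or slices between consecutive indices.
def split_by_descending_edge_py (bin_str : String) : List String :=
  let st := (PySem.List.enumerate bin_str.toList 0).foldl
    (fun (st : List Int × Char) (p : Int × Char) =>
      (if st.2 = '1' ∧ p.2 = '0' then st.1 ++ [p.1] else st.1, p.2))
    ([0], '0')
  let split_idx := st.1
  if split_idx.length = 1 then [bin_str]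
  else
    ((split_idx.zip ((PySem.List.slice split_idx (some 1) none).map some ++ [none]))).map
      (fun ij => PySem.Str.slice bin_str (some ij.1) ij.2)

-- ===== PORT B =====
-- literal port of Source B: one foldl with state (result, current chunk, prev char);
-- the Python string accumulator `cur` is carried as its character list and turned
-- into a String exactly where Source B appends it to the result.
def split_by_descending_edge_py_alt (bin_str : String) : List String :=
  let st := bin_str.toList.foldl
    (fun (st : List String × List Char × Char) (ch : Char) =>
      let st' := if st.2.2 = '1' ∧ ch = '0'
                 then (st.1 ++ [String.ofList st.2.1], ([] : List Char), st.2.2)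
                 else st
      (st'.1, st'.2.1 ++ [ch], ch))
    ([], [], '0')
  st.1 ++ [String.ofList st.2.1]

-- ===== PRECONDITION & SPEC =====
def Spec_split_by_descending_edge_py (bin_str : String) (out : List String) : Prop := out = split_by_descending_edge_py_alt bin_str
instance (bin_str : String) (out : List String) : Decidable (Spec_split_by_descending_edge_py bin_str out) := by unfold Spec_split_by_descending_edge_py; infer_instance

-- ===== CLAIM (what is proved, stated in full; the proofs are below) =====
def Claim_equal_split_by_descending_edge_py : Prop := ∀ (bin_str : String), Dom_split_by_descending_edge_py bin_str → Spec_split_by_descending_edge_py bin_str (split_by_descending_edge_py bin_str)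

-- ===== LEMMAS AND PROOFS =====

/-- Prepend `x` onto the first chunk of a chunk list. -/
def hcons (x : List Char) : List (List Char) → List (List Char)
  | [] => [x]
  | k :: ks => (x ++ k) :: ks

/-- The chunks both programs compute: split `cs` before each `'1'→'0'` edge. -/
def chunksFrom (prev : Char) : List Char → List (List Char)
  | [] => [[]]
  | c :: cs =>
    if prev = '1' ∧ c = '0' then [] :: hcons [c] (chunksFrom c cs)
    else hcons [c] (chunksFrom c cs)

/-- Absolute positions of the `'1'→'0'` edges, counting from `n`. -/
def edges (n : Int) (prev : Char) : List Char → List Int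
  | [] => []
  | c :: cs => (if prev = '1' ∧ c = '0' then [n] else []) ++ edges (n + 1) c cs

/-- Partial sums of chunk lengths (the inner split indices), from offset `n`. -/
def psums (n : Int) : List (List Char) → List Int
  | [] => []
  | [_] => []
  | k :: ks => (n + k.length) :: psums (n + k.length) ks

theorem chunksFrom_ne_nil (prev : Char) (cs : List Char) : chunksFrom prev cs ≠ [] := by
  cases cs with
  | nil => simp [chunksFrom]
  | cons c cs => simp only [chunksFrom]; split_ifs <;> cases h : chunksFrom c cs <;> simp [hcons]

theorem flatten_hcons (x : List Char) (ks : List (List Char)) :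
    (hcons x ks).flatten = x ++ ks.flatten := by
  cases ks <;> simp [hcons]

theorem flatten_chunksFrom (prev : Char) (cs : List Char) :
    (chunksFrom prev cs).flatten = cs := by
  induction cs generalizing prev with
  | nil => simp [chunksFrom]
  | cons c cs ih => simp only [chunksFrom]; split_ifs <;> simp [flatten_hcons, ih]

theorem psums_hcons (c : Char) (k : List Char) (ks : List (List Char)) (n : Int) :
    psums n (hcons [c] (k :: ks)) = psums (n + 1) (k :: ks) := by
  cases ks with
  | nil => simp [hcons, psums]
  | cons k' ks' =>
    simp only [hcons, psums, List.length_append, List.length_cons, List.length_nil]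
    have h : n + ((1 : Nat) + k.length : Nat) = n + 1 + (k.length : Int) := by push_cast; ring
    rw [h]

theorem edges_eq_psums (cs : List Char) (prev : Char) (n : Int) :
    edges n prev cs = psums n (chunksFrom prev cs) := by
  induction cs generalizing prev n with
  | nil => simp [edges, chunksFrom, psums]
  | cons c cs ih =>
    obtain ⟨k, ks, hk⟩ : ∃ k ks, chunksFrom c cs = k :: ks := by
      cases h : chunksFrom c cs with
      | nil => exact absurd h (chunksFrom_ne_nil c cs)
      | cons k ks => exact ⟨k, ks, rfl⟩
    simp only [edges, chunksFrom]
    split_ifs with h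
    · rw [ih c (n + 1), hk]
      rw [show ([] :: hcons [c] (k :: ks)) = [] :: ([c] ++ k) :: ks by simp [hcons]]
      simp only [psums, List.length_nil, Nat.cast_zero, add_zero]
      rw [show (([c] ++ k) :: ks) = hcons [c] (k :: ks) by simp [hcons], psums_hcons]
      simp
    · rw [ih c (n + 1), hk, psums_hcons]
      simp

/-- A's index-collecting loop, characterised. -/
theorem A_loop (cs : List Char) (n : Int) (is : List Int) (prev : Char) :
    (PySem.List.enumerate cs n).foldl
      (fun (st : List Int × Char) (p : Int × Char) =>
        (if st.2 = '1' ∧ p.2 = '0' then st.1 ++ [p.1] else st.1, p.2))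
      (is, prev)
    = (is ++ edges n prev cs, cs.getLastD prev) := by
  induction cs generalizing n is prev with
  | nil => simp [PySem.List.enumerate_nil, edges]
  | cons c cs ih =>
    rw [PySem.List.enumerate_cons]
    simp only [List.foldl_cons, edges]
    split_ifs with h <;> (simp only [ih]; cases cs <;> simp [List.getLastD])

/-- B's loop, characterised. -/
theorem B_loop (cs : List Char) (res : List String) (cur : List Char) (prev : Char) :
    (let st := cs.foldl
      (fun (st : List String × List Char × Char) (ch : Char) =>
        let st' := if st.2.2 = '1' ∧ ch = '0'
                   then (st.1 ++ [String.ofList st.2.1], ([] : List Char), st.2.2)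
                   else st
        (st'.1, st'.2.1 ++ [ch], ch))
      (res, cur, prev)
     st.1 ++ [String.ofList st.2.1])
    = res ++ (hcons cur (chunksFrom prev cs)).map String.ofList := by
  induction cs generalizing res cur prev with
  | nil => simp [chunksFrom, hcons]
  | cons c cs ih =>
    simp only [List.foldl_cons, chunksFrom]
    split_ifs with h
    · rw [ih]
      obtain ⟨k, ks, hk⟩ : ∃ k ks, chunksFrom c cs = k :: ks := by
        cases hx : chunksFrom c cs with
        | nil => exact absurd hx (chunksFrom_ne_nil c cs)
        | cons k ks => exact ⟨k, ks, rfl⟩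
      simp [hk, hcons, List.append_assoc]
    · rw [ih]
      obtain ⟨k, ks, hk⟩ : ∃ k ks, chunksFrom c cs = k :: ks := by
        cases hx : chunksFrom c cs with
        | nil => exact absurd hx (chunksFrom_ne_nil c cs)
        | cons k ks => exact ⟨k, ks, rfl⟩
      simp [hk, hcons, List.append_assoc]

/-- Slicing the flattened chunk list at its partial sums returns the chunks. -/
theorem slice_psums (ks : List (List Char)) (pre : List Char) (hne : ks ≠ []) :
    (((pre.length : Int) :: psums (pre.length : Int) ks).zip
        ((psums (pre.length : Int) ks).map some ++ [none])).map
      (fun ij => PySem.List.slice (pre ++ ks.flatten) (some ij.1) ij.2)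
    = ks := by
  induction ks generalizing pre with
  | nil => exact absurd rfl hne
  | cons k ks ih =>
    cases ks with
    | nil =>
      simp [psums, PySem.List.slice_from_natCast]
    | cons k' ks' =>
      simp only [psums, List.map_cons, List.cons_append, List.zip_cons_cons, List.flatten_cons]
      congr 1
      · rw [PySem.List.slice_natCast_add]
        simp
      · have := ih (pre ++ k) (by simp)
        simp only [List.length_append, Nat.cast_add, List.append_assoc, List.flatten_cons] at this ⊢
        exact this

theorem psums_nil_iff (ks : List (List Char)) (n : Int) (hne : ks ≠ []) :
    psums n ks = [] ↔ ∃ k, ks = [k] := by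
  cases ks with
  | nil => exact absurd rfl hne
  | cons k ks =>
    cases ks with
    | nil => simp [psums]
    | cons k' ks' => simp [psums]

-- ===== VERDICT (by name: the statement is the Claim_ definition above) =====
theorem split_by_descending_edge_py_spec : Claim_equal_split_by_descending_edge_py := by
  intro bin_str _
  unfold Spec_split_by_descending_edge_py
  unfold split_by_descending_edge_py split_by_descending_edge_py_alt
  rw [B_loop]
  rw [A_loop bin_str.toList 0 [0] '0']
  simp only []
  set cs := bin_str.toList with hcs
  rw [edges_eq_psums cs '0' 0]
  obtain ⟨k, ks, hk⟩ : ∃ k ks, chunksFrom '0' cs = k :: ks := by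
    cases hx : chunksFrom '0' cs with
    | nil => exact absurd hx (chunksFrom_ne_nil '0' cs)
    | cons k ks => exact ⟨k, ks, rfl⟩
  by_cases hone : psums 0 (chunksFrom '0' cs) = []
  · -- no edges: a single chunk, which is the whole string
    obtain ⟨k₀, hk₀⟩ := (psums_nil_iff _ 0 (chunksFrom_ne_nil '0' cs)).mp hone
    have hflat := flatten_chunksFrom '0' cs
    rw [hk₀] at hflat ⊢
    simp only [List.flatten_cons, List.flatten_nil, List.append_nil] at hflat
    subst hflat
    simp [psums, hcons, hcs, String.ofList_toList]
  · -- at least one edge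
    have hlen : ¬ (List.length ([(0 : Int)] ++ psums 0 (chunksFrom '0' cs)) = 1) := by
      simp only [List.length_append, List.length_cons, List.length_nil]
      cases hp : psums 0 (chunksFrom '0' cs) with
      | nil => exact absurd hp hone
      | cons a l => simp
    rw [if_neg hlen]
    -- Python's split_idx[1:] is the tail of the index list
    rw [show ([(0 : Int)] ++ psums 0 (chunksFrom '0' cs))
        = (0 : Int) :: psums 0 (chunksFrom '0' cs) by simp]
    rw [PySem.List.slice_from_one]
    simp only [List.tail_cons]
    -- string slices are list slices followed by String.ofList
    have hmap : ∀ (l : List (Int × Option Int)),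
        l.map (fun ij => PySem.Str.slice bin_str (some ij.1) ij.2)
        = (l.map (fun ij => PySem.List.slice cs (some ij.1) ij.2)).map String.ofList := by
      intro l
      rw [List.map_map]
      apply List.map_congr_left
      intro ij _
      have : (PySem.Str.slice bin_str (some ij.1) ij.2).toList
          = PySem.List.slice cs (some ij.1) ij.2 := by simp [pysem, hcs]
      simp only [Function.comp_apply]
      rw [← this, String.ofList_toList]
    rw [hmap]
    -- slicing the string at the partial sums recovers the chunks
    have key := slice_psums (chunksFrom '0' cs) [] (chunksFrom_ne_nil '0' cs)
    simp only [List.length_nil, Nat.cast_zero, List.nil_append,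
      flatten_chunksFrom] at key
    rw [key]
    simp [hk, hcons]
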